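-- pv_equiv track=rewrite | github.com/linzeyang/leetcode-solutions | easy/3803.py | residuePrefixes
-- ===== SOURCE A (Python) =====
-- def residuePrefixes(s: str) -> int:
--     out: int = 0
--
--     char_set: set[str] = set()
--
--     for idx, char in enumerate(s, start=1):
--         char_set.add(char)
--
--         if len(char_set) == idx % 3:
--             out += 1
--
--     return out
-- ===== SOURCE B (Python) =====
-- def residuePrefixes(s: str) -> int:
--     return sum(1 for i in range(1, len(s) + 1) if len(set(s[:i])) == i % 3)
-- ===== Notes on version B (the rewrite author's own statement) =====
-- stated objective: simpler
-- what changed: Replaces the single pass that threads one growing set and a counter through an enumerate loop by a one-line closed-form count: for each prefix length i, rebuild set(s[:i]) from scratch and sum the prefixes whose distinct-character count equals i % 3.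
import Mathlib
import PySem

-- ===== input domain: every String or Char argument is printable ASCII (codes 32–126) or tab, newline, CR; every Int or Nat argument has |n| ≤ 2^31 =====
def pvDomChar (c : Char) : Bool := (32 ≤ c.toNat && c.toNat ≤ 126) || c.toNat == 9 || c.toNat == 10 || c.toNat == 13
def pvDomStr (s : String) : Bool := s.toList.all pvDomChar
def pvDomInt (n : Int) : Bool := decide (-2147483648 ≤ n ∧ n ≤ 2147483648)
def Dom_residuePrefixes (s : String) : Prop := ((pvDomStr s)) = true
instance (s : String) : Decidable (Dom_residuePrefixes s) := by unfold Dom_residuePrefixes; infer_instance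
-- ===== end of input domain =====

-- B replaces A's single pass carrying a growing set by a per-prefix recount (simpler one-liner, not faster).

-- ===== PORT A =====
def residuePrefixes (s : String) : Int :=
  ((PySem.List.enumerate s.toList 1).foldl
    (fun (st : Int × PySem.Set Char) (ic : Int × Char) =>
      let cs := PySem.Set.add st.2 ic.2
      (if PySem.Set.len cs = PySem.Int.mod ic.1 3 then st.1 + 1 else st.1, cs))
    (0, PySem.Set.empty)).1

-- ===== PORT B =====
def residuePrefixes_alt (s : String) : Int :=
  ((PySem.List.pyRange 1 ((s.toList.length : Int) + 1) 1).map
    (fun i =>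
      if PySem.Set.len (PySem.Set.ofList (PySem.List.slice s.toList none (some i))) = PySem.Int.mod i 3
      then (1 : Int) else 0)).sum

-- ===== PRECONDITION & SPEC =====
def Spec_residuePrefixes (s : String) (out : Int) : Prop := out = residuePrefixes_alt s
instance (s : String) (out : Int) : Decidable (Spec_residuePrefixes s out) := by unfold Spec_residuePrefixes; infer_instance

-- ===== CLAIM (what is proved, stated in full; the proofs are below) =====
def Claim_equal_residuePrefixes : Prop := ∀ (s : String), Dom_residuePrefixes s → Spec_residuePrefixes s (residuePrefixes s)

-- ===== LEMMAS AND PROOFS =====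
def pvStep (st : Int × PySem.Set Char) (ic : Int × Char) : Int × PySem.Set Char :=
  let cs := PySem.Set.add st.2 ic.2
  (if PySem.Set.len cs = PySem.Int.mod ic.1 3 then st.1 + 1 else st.1, cs)

def pvB (l : List Char) : Int :=
  ((PySem.List.pyRange 1 ((l.length : Int) + 1) 1).map
    (fun i =>
      if PySem.Set.len (PySem.Set.ofList (PySem.List.slice l none (some i))) = PySem.Int.mod i 3
      then (1 : Int) else 0)).sum

lemma pvKey (l : List Char) :
    (PySem.List.enumerate l 1).foldl pvStep ((0 : Int), (PySem.Set.empty : PySem.Set Char))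
      = (pvB l, PySem.Set.ofList l) := by
  induction l using List.reverseRecOn with
  | nil => simp [pvB, PySem.List.pyRange_one_eq_nil, PySem.List.enumerate, PySem.Set.ofList]
  | append_singleton l c ih =>
    rw [PySem.List.enumerate_append, List.foldl_append, ih]
    have hof : PySem.Set.ofList (l ++ [c]) = PySem.Set.add (PySem.Set.ofList l) c := by
      simp [PySem.Set.ofList_eq_foldl, List.foldl_append]
    have hB : pvB (l ++ [c]) = pvB l +
        (if PySem.Set.len (PySem.Set.ofList (l ++ [c])) = PySem.Int.mod ((l.length : Int) + 1) 3
         then (1 : Int) else 0) := by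
      unfold pvB
      have hlen : ((l ++ [c]).length : Int) + 1 = ((l.length : Int) + 1) + 1 := by
        simp
      rw [hlen, PySem.List.pyRange_one_succ_right (by omega : (1:Int) ≤ (l.length : Int) + 1)]
      rw [List.map_append, List.sum_append]
      congr 1
      · apply congrArg List.sum
        apply List.map_congr_left
        intro i hi
        rw [PySem.List.mem_pyRange_one] at hi
        have h0 : (0:Int) ≤ i := by omega
        rw [PySem.List.slice_to _ h0, PySem.List.slice_to _ h0,
            List.take_append_of_le_length (by omega : i.toNat ≤ l.length)]
      · simp [PySem.List.slice_to _ (by omega : (0:Int) ≤ (l.length : Int) + 1)]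
        rw [show l.length + 1 = (l ++ [c]).length by simp, List.take_length]
    rw [hB, hof]
    simp [PySem.List.enumerate, pvStep]
    rw [show (1 : Int) + (l.length : Int) = (l.length : Int) + 1 by ring]
    split_ifs <;> ring

-- ===== VERDICT (by name: the statement is the Claim_ definition above) =====
theorem residuePrefixes_spec : Claim_equal_residuePrefixes := by
  intro s _
  unfold Spec_residuePrefixes residuePrefixes residuePrefixes_alt
  have := pvKey s.toList
  rw [show (fun (st : Int × PySem.Set Char) (ic : Int × Char) =>
      let cs := PySem.Set.add st.2 ic.2
      (if PySem.Set.len cs = PySem.Int.mod ic.1 3 then st.1 + 1 else st.1, cs)) = pvStep from rfl]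
  rw [this]
  rfl
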